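-- pv_equiv track=rewrite | github.com/leesilverash/AlgorithmStudy | Programmers/레벨1/레벨1_직업군 추천하기.py | solution
-- ===== SOURCE A (Python) =====
-- def solution(table, languages, preference):
--     answer = ''
--     score = {}
--     for i in range(len(languages)):
--         score[languages[i]] = preference[i]
--     max_score = 0
--     for information in table:
--         inf = information.split()
--         current_score = {inf[i]: 6 - i for i in range(1, len(inf))}
--         total_score = 0
--
--         for lan in score.keys():
--             if current_score.get(lan):
--                 total_score += (current_score[lan] * score[lan])
--
--         if total_score == max_score:
--             if answer > inf[0]:
--                 answer = inf[0]
--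
--         if total_score > max_score:
--             max_score = total_score
--             answer = inf[0]
--
--     return answer
-- ===== SOURCE B (Python) =====
-- def solution(table, languages, preference):
--     pref = dict(zip(languages, preference))
--     names = []
--     totals = []
--     for row in table:
--         parts = row.split()
--         names.append(parts[0])
--         cs = {parts[i]: 6 - i for i in range(1, len(parts))}
--         totals.append(sum(v * pref.get(k, 0) for k, v in cs.items()))
--     best = max(totals, default=0)
--     if best <= 0:
--         return ''
--     return min(n for n, t in zip(names, totals) if t == best)
-- ===== Notes on version B (the rewrite author's own statement) =====
-- stated objective: alternative
-- what changed: A's online single pass with a running (answer, max_score) state machine and explicit tie/update branches becomes staged offline passes: score every row into a totals list (summing v*pref.get(k,0) over the row dict's items instead of scanning pref's keys with a truthiness guard), take max(totals, default=0), and if it is positive return the min of the names of the rows attaining it.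
-- outside the precondition, e.g. on solution(['a b', '   '], ['b'], [3]): A returns 'a', B raises IndexError
import Mathlib
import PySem

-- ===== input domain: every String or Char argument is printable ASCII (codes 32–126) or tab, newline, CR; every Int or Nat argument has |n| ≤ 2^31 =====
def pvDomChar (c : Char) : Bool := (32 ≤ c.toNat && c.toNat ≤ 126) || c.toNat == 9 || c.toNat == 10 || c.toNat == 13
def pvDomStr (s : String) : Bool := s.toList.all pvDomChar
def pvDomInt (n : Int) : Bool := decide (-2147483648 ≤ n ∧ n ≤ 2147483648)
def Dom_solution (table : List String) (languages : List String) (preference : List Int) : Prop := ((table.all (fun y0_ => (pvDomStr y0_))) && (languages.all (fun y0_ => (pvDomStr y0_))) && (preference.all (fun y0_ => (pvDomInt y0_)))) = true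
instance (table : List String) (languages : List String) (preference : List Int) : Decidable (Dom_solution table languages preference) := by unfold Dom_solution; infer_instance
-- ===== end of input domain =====

-- B replaces A's online running-(answer,max_score) state machine by staged passes: score all rows
-- (iterating the row dict's items instead of pref's keys), take the max, then the min matching name
-- (objective: alternative).

-- ===== PORT A =====
-- score = {}; for i in range(len(languages)): score[languages[i]] = preference[i]
def scoreDictA (languages : List String) (preference : List Int) : PySem.Dict String Int :=
  (PySem.List.pyRange 0 (languages.length : Int)).foldl
    (fun d i => d.insert (PySem.List.pyGetD languages i "") (PySem.List.pyGetD preference i 0))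
    PySem.Dict.empty

-- {words[i]: 6 - i for i in range(1, len(words))} — the identical comprehension appears in both
-- A (current_score) and B (cs), so both ports share this helper
def rowDict (words : List String) : PySem.Dict String Int :=
  (PySem.List.pyRange 1 (words.length : Int)).foldl
    (fun d i => d.insert (PySem.List.pyGetD words i "") (6 - i)) PySem.Dict.empty

-- for lan in score.keys(): if current_score.get(lan): total_score += current_score[lan] * score[lan]
-- (`.get(lan)` is truthy iff the key is present with nonzero value; the [] lookups are getD,
--  exact because the truthiness test guarantees presence)
def rowTotalA (score cs : PySem.Dict String Int) : Int :=
  score.keys.foldl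
    (fun t lan => if (cs.get? lan).getD 0 ≠ 0 then t + cs.getD lan 0 * score.getD lan 0 else t) 0

-- one iteration of A's main loop over `table`; state = (answer, max_score);
-- inf[0] is pyGetD inf 0 "" — Pre_ guarantees inf ≠ [] so the default is never read
def stepA (score : PySem.Dict String Int) (p : String × Int) (row : String) : String × Int :=
  let inf := PySem.Str.split₀ row
  let inf0 := PySem.List.pyGetD inf 0 ""
  let t := rowTotalA score (rowDict inf)
  let p1 := if t = p.2 ∧ inf0 < p.1 then (inf0, p.2) else p
  if t > p1.2 then (inf0, t) else p1

def solution (table : List String) (languages : List String) (preference : List Int) : String :=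
  (table.foldl (stepA (scoreDictA languages preference)) ("", 0)).1

-- ===== PORT B =====
-- pref = dict(zip(languages, preference))
def prefDictB (languages : List String) (preference : List Int) : PySem.Dict String Int :=
  (languages.zip preference).foldl (fun d q => d.insert q.1 q.2) PySem.Dict.empty

-- sum(v * pref.get(k, 0) for k, v in cs.items())
def rowTotalB (pref cs : PySem.Dict String Int) : Int :=
  (cs.items.map (fun kv => kv.2 * pref.getD kv.1 0)).sum

-- names.append(parts[0]); totals.append(...) — parts[0] is pyGetD parts 0 "";
-- Pre_ guarantees parts ≠ [] so the default is never read
def solution_alt (table : List String) (languages : List String) (preference : List Int) : String :=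
  let pref := prefDictB languages preference
  let p := table.foldl
    (fun (acc : List String × List Int) row =>
      (acc.1 ++ [PySem.List.pyGetD (PySem.Str.split₀ row) 0 ""],
       acc.2 ++ [rowTotalB pref (rowDict (PySem.Str.split₀ row))])) ([], [])
  let best := PySem.List.maxD p.2 (fun x => x) 0
  if best ≤ 0 then ""
  else
    -- best > 0 is attained by some row, so the filtered list is nonempty and
    -- the .getD "" default (Python's min on an empty iterable would raise) is never read
    (PySem.List.min? (((p.1.zip p.2).filter (fun q => q.2 == best)).map (fun q => q.1))
      (fun x => x)).getD ""

-- ===== PRECONDITION & SPEC =====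
-- Pre_ excludes (a) preference shorter than languages, where A's score-building loop raises
-- IndexError, and (b) tables containing a whitespace-only row: A raises IndexError on inf[0]
-- there except when an earlier row already set a positive max_score (an accident of which
-- branch is reached); B raises IndexError on parts[0] for every such row.
def Pre_solution (table : List String) (languages : List String) (preference : List Int) : Prop :=
  languages.length ≤ preference.length ∧ ∀ r ∈ table, PySem.Str.split₀ r ≠ []
instance (table : List String) (languages : List String) (preference : List Int) : Decidable (Pre_solution table languages preference) := by unfold Pre_solution; infer_instance

def pvWitness_solution : List String × List String × List Int :=
  (["java python c cpp", "python java js"], ["python", "java"], [7, 5])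

def Spec_solution (table : List String) (languages : List String) (preference : List Int) (out : String) : Prop := out = solution_alt table languages preference
instance (table : List String) (languages : List String) (preference : List Int) (out : String) : Decidable (Spec_solution table languages preference out) := by unfold Spec_solution; infer_instance

-- ===== CLAIM (what is proved, stated in full; the proofs are below) =====
def Claim_equal_solution : Prop := ∀ (table : List String) (languages : List String) (preference : List Int), Dom_solution table languages preference → Pre_solution table languages preference → Spec_solution table languages preference (solution table languages preference)


-- ===== LEMMAS AND PROOFS =====

-- per-row name and total, and B's staged quantities, as named functions for the proofs
def nmF (r : String) : String := PySem.List.pyGetD (PySem.Str.split₀ r) 0 ""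
def ttF (d : PySem.Dict String Int) (r : String) : Int := rowTotalA d (rowDict (PySem.Str.split₀ r))
def bBest (d : PySem.Dict String Int) (rows : List String) : Int :=
  match rows.map (ttF d) with | [] => 0 | x :: xs => xs.foldl max x
def minM (xs : List String) : String := match xs with | [] => "" | x :: ys => ys.foldl min x
def bAns (d : PySem.Dict String Int) (rows : List String) : String :=
  if bBest d rows ≤ 0 then ""
  else minM ((rows.filter (fun r => ttF d r == bBest d rows)).map nmF)

-- the two language→preference dicts agree when preference is long enough
theorem scoreDict_aux (lang : List String) (pref : List Int) :
    ∀ (n : Nat) (d : PySem.Dict String Int), n ≤ lang.length → lang.length ≤ pref.length →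
    (List.range n).foldl
      (fun d k => d.insert (PySem.List.pyGetD lang (k : Int) "") (PySem.List.pyGetD pref (k : Int) 0)) d
    = ((lang.zip pref).take n).foldl (fun d q => d.insert q.1 q.2) d := by
  intro n
  induction n with
  | zero => intro d _ _; simp
  | succ m ih =>
    intro d hm hl
    have hm' : m < lang.length := by omega
    have hp' : m < pref.length := by omega
    have hz : m < (lang.zip pref).length := by simp [List.length_zip]; omega
    rw [List.range_succ, List.foldl_append, ih d (by omega) hl, List.take_add_one,
        List.getElem?_eq_getElem hz, List.foldl_append]
    simp [List.getElem_zip, List.getElem?_eq_getElem hm', List.getElem?_eq_getElem hp']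

theorem scoreDict_eq (lang : List String) (pref : List Int) (h : lang.length ≤ pref.length) :
    scoreDictA lang pref = prefDictB lang pref := by
  unfold scoreDictA prefDictB
  rw [PySem.List.pyRange_zero_natCast, List.foldl_map,
      scoreDict_aux lang pref lang.length PySem.Dict.empty le_rfl h,
      List.take_of_length_le (by rw [List.length_zip]; omega)]

theorem nodup_keys_scoreDictA (lang : List String) (pref : List Int) :
    (scoreDictA lang pref).keys.Nodup := by
  unfold scoreDictA
  exact PySem.Dict.nodup_keys_foldl_insert_key _ _ _ _ PySem.Dict.nodup_keys_empty

theorem nodup_keys_rowDict (ws : List String) : (rowDict ws).keys.Nodup := by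
  unfold rowDict
  exact PySem.Dict.nodup_keys_foldl_insert_key _ _ _ _ PySem.Dict.nodup_keys_empty

-- A's truthiness-guarded accumulation over score.keys as a filtered sum
theorem rowTotal_aux (cs d : PySem.Dict String Int) :
    ∀ (l : List String) (t0 : Int),
    l.foldl (fun t lan => if (cs.get? lan).getD 0 ≠ 0 then t + cs.getD lan 0 * d.getD lan 0 else t) t0
    = t0 + ((l.filter (fun lan => cs.contains lan)).map (fun lan => cs.getD lan 0 * d.getD lan 0)).sum := by
  intro l
  induction l with
  | nil => intro t0; simp
  | cons a l ih =>
    intro t0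
    rw [List.foldl_cons, ih]
    rcases h : cs.get? a with _ | v
    · have hc : cs.contains a = false := by
        rw [PySem.Dict.contains_eq_isSome_get?, h]; rfl
      simp [hc]
    · have hc : cs.contains a = true := by
        rw [PySem.Dict.contains_eq_isSome_get?, h]; rfl
      have hg : cs.getD a 0 = v := PySem.Dict.getD_of_get?_eq_some cs 0 h
      by_cases hv : v = 0
      · simp [hc, hg, hv]
      · simp [hc, hg, hv]; ring

-- A's sum over score's keys equals B's sum over the row dict's items
theorem rowTotal_eq (d cs : PySem.Dict String Int) (hd : d.keys.Nodup) (hcs : cs.keys.Nodup) :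
    rowTotalA d cs = rowTotalB d cs := by
  unfold rowTotalA rowTotalB
  rw [rowTotal_aux cs d d.keys 0, zero_add,
      PySem.Dict.items_eq_map_keys cs hcs 0, List.map_map]
  have hcomp : ((fun kv : String × Int => kv.2 * d.getD kv.1 0) ∘ fun k => (k, cs.getD k 0))
      = fun l => cs.getD l 0 * d.getD l 0 := rfl
  rw [hcomp]
  rw [← List.sum_toFinset _ (hd.filter _), ← List.sum_toFinset _ hcs]
  apply Finset.sum_subset
  · intro x hx
    simp only [List.mem_toFinset, List.mem_filter] at hx ⊢
    exact (PySem.Dict.contains_iff_mem_keys cs x).mp hx.2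
  · intro x hx hnx
    simp only [List.mem_toFinset, List.mem_filter] at hx hnx
    have hcx : cs.contains x = true := (PySem.Dict.contains_iff_mem_keys cs x).mpr hx
    have hdx : d.contains x = false := by
      cases hc : d.contains x with
      | false => rfl
      | true => exact absurd ⟨(PySem.Dict.contains_iff_mem_keys d x).mp hc, hcx⟩ hnx
    rw [PySem.Dict.getD_of_not_contains d 0 hdx, mul_zero]

-- one step of A's loop, with the dead p1.2 projection simplified away
theorem step_eval (d : PySem.Dict String Int) (a : String) (M : Int) (r : String) :
    stepA d (a, M) r =
      if ttF d r > M then (nmF r, ttF d r)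
      else if ttF d r = M ∧ nmF r < a then (nmF r, M) else (a, M) := by
  simp only [stepA, nmF, ttF]
  by_cases hand : rowTotalA d (rowDict (PySem.Str.split₀ r)) = M ∧
      PySem.List.pyGetD (PySem.Str.split₀ r) 0 "" < a
  · rw [if_pos hand]
  · rw [if_neg hand]

theorem bBest_append (d : PySem.Dict String Int) (l : List String) (r : String) :
    bBest d (l ++ [r]) = if l = [] then ttF d r else max (bBest d l) (ttF d r) := by
  cases l with
  | nil => simp [bBest]
  | cons a as => simp [bBest, List.foldl_append]

theorem ttF_le_bBest (d : PySem.Dict String Int) {l : List String} (r' : String) (h : r' ∈ l) :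
    ttF d r' ≤ bBest d l := by
  cases l with
  | nil => cases h
  | cons a as =>
    show ttF d r' ≤ (as.map (ttF d)).foldl max (ttF d a)
    rcases List.mem_cons.mp h with rfl | hmem
    · exact (PySem.List.le_foldl_max _ _).1
    · exact (PySem.List.le_foldl_max _ _).2 _ (List.mem_map_of_mem hmem)

theorem bBest_attained (d : PySem.Dict String Int) {l : List String} (hl : l ≠ []) :
    ∃ r0 ∈ l, ttF d r0 = bBest d l := by
  cases l with
  | nil => exact absurd rfl hl
  | cons a as =>
    have hfold : bBest d (a :: as) = (as.map (ttF d)).foldl max (ttF d a) := rfl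
    rcases PySem.List.foldl_max_mem (as.map (ttF d)) (ttF d a) with h | h
    · exact ⟨a, List.mem_cons_self .., by rw [hfold, h]⟩
    · rcases List.mem_map.mp h with ⟨r0, hr0, hv⟩
      exact ⟨r0, List.mem_cons_of_mem _ hr0, by rw [hfold, ← hv]⟩

theorem minM_append (xs : List String) (x : String) (h : xs ≠ []) :
    minM (xs ++ [x]) = min (minM xs) x := by
  cases xs with
  | nil => exact absurd rfl h
  | cons y ys => simp [minM, List.foldl_append]

-- the main loop invariant: A's state machine computes B's staged (answer, clamped best)
theorem loop_inv (d : PySem.Dict String Int) (rows : List String) :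
    rows.foldl (stepA d) ("", 0) = (bAns d rows, max 0 (bBest d rows)) := by
  induction rows using List.reverseRecOn with
  | nil => simp [bAns, bBest]
  | append_singleton l r ih =>
    rw [List.foldl_append, ih, List.foldl_cons, List.foldl_nil, step_eval]
    rcases eq_or_ne l [] with rfl | hl
    · have h0 : bBest d ([] : List String) = 0 := rfl
      have ha0 : bAns d ([] : List String) = "" := by simp [bAns, h0]
      have hb1 : bBest d [r] = ttF d r := by simp [bBest]
      simp only [List.nil_append, h0, ha0, max_self]
      by_cases ht : 0 < ttF d r
      · rw [if_pos ht]
        have hans : bAns d [r] = nmF r := by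
          unfold bAns
          rw [hb1, if_neg (by omega)]
          have hfr : [r].filter (fun r' => ttF d r' == ttF d r) = [r] := by simp
          rw [hfr]; rfl
        rw [hans, hb1, max_eq_right ht.le]
      · rw [if_neg ht]
        have hn : ¬ nmF r < "" := by simp
        rw [if_neg (fun h => hn h.2)]
        have hans : bAns d [r] = "" := by unfold bAns; rw [hb1, if_pos (by omega)]
        rw [hans, hb1, max_eq_left (by omega)]
    · have hsnoc : bBest d (l ++ [r]) = max (bBest d l) (ttF d r) := by
        rw [bBest_append]; simp [hl]
      set B0 := bBest d l with hB0
      set t := ttF d r with htdef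
      set n := nmF r with hndef
      have hM1 : (0 : Int) ≤ max 0 B0 := le_max_left 0 B0
      have hM2 : B0 ≤ max 0 B0 := le_max_right 0 B0
      have hM3 := max_choice 0 B0
      have hb1 : B0 ≤ max B0 t := le_max_left B0 t
      have hb2 : t ≤ max B0 t := le_max_right B0 t
      have hb3 := max_choice B0 t
      by_cases hgt : t > max 0 B0
      · have htpos : 0 < t := by omega
        have hB1 : max B0 t = t := by rcases hb3 with h | h <;> omega
        have hfl : l.filter (fun r' => ttF d r' == t) = [] := by
          refine List.filter_eq_nil_iff.mpr (fun r' hr' => ?_)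
          have hle := ttF_le_bBest d r' hr'
          rw [← hB0] at hle
          simp only [beq_iff_eq]
          omega
        have hans : bAns d (l ++ [r]) = n := by
          unfold bAns
          rw [hsnoc, hB1, if_neg (by omega), List.filter_append, hfl, List.nil_append]
          have hfr : [r].filter (fun r' => ttF d r' == t) = [r] := by simp [← htdef]
          rw [hfr, hndef]; rfl
        rw [if_pos hgt, hans, hsnoc, hB1, max_eq_right htpos.le]
      · rw [if_neg hgt]
        by_cases hM : 0 < max 0 B0
        · have hB0M : max 0 B0 = B0 := by rcases hM3 with h | h <;> omega
          have hbne : ¬ B0 ≤ 0 := by omega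
          by_cases hteq : t = max 0 B0
          · have hB1 : max B0 t = B0 := by rcases hb3 with h | h <;> omega
            have hxs : (l.filter (fun r' => ttF d r' == B0)).map nmF ≠ [] := by
              rcases bBest_attained d hl with ⟨r0, hr0, hv⟩
              rw [← hB0] at hv
              have hmem : r0 ∈ l.filter (fun r' => ttF d r' == B0) :=
                List.mem_filter.mpr ⟨hr0, by simp [hv]⟩
              simp only [ne_eq, List.map_eq_nil_iff]
              exact fun hnil => by rw [hnil] at hmem; cases hmem
            have ha : bAns d l = minM ((l.filter (fun r' => ttF d r' == B0)).map nmF) := by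
              unfold bAns; rw [← hB0, if_neg hbne]
            have hans : bAns d (l ++ [r]) =
                min (minM ((l.filter (fun r' => ttF d r' == B0)).map nmF)) n := by
              unfold bAns
              rw [hsnoc, hB1, if_neg hbne, List.filter_append]
              have hfr : [r].filter (fun r' => ttF d r' == B0) = [r] := by
                simp [← htdef, hteq, hB0M]
              rw [hfr, List.map_append]
              have hng : ([r].map nmF) = [n] := by rw [hndef]; rfl
              rw [hng]
              exact minM_append _ _ hxs
            have hfirst : (if t = max 0 B0 ∧ n < bAns d l then (n, max 0 B0)
                  else (bAns d l, max 0 B0)) = (min (bAns d l) n, max 0 B0) := by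
              by_cases hlt : n < bAns d l
              · rw [if_pos ⟨hteq, hlt⟩, min_eq_right hlt.le]
              · rw [if_neg (fun h => hlt h.2), min_eq_left (le_of_not_gt hlt)]
            rw [hfirst, hans, ← ha, hsnoc, hB1, hB0M]
          · have htlt : t < max 0 B0 := by
              rcases lt_trichotomy t (max 0 B0) with h | h | h
              · exact h
              · exact absurd h hteq
              · exact absurd h hgt
            have hB1 : max B0 t = B0 := by rcases hb3 with h | h <;> omega
            rw [if_neg (fun h => hteq h.1)]
            have hans : bAns d (l ++ [r]) = bAns d l := by
              unfold bAns
              rw [hsnoc, hB1, ← hB0, List.filter_append]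
              have hfr : [r].filter (fun r' => ttF d r' == B0) = [] := by
                simp only [List.filter_cons, List.filter_nil]
                have hne : (ttF d r == B0) = false := by
                  simp only [← htdef, beq_eq_false_iff_ne, ne_eq]
                  omega
                rw [hne]; simp
              rw [hfr, List.append_nil]
            rw [hans, hsnoc, hB1, hB0M]
        · have hM0 : max 0 B0 = 0 := by rcases hM3 with h | h <;> omega
          have hB0le : B0 ≤ 0 := by omega
          have hB1le : max B0 t ≤ 0 := by rcases hb3 with h | h <;> omega
          have ha : bAns d l = "" := by unfold bAns; rw [← hB0, if_pos hB0le]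
          rw [ha]
          have hn : ¬ n < "" := by simp
          rw [if_neg (fun h => hn h.2)]
          have hansr : bAns d (l ++ [r]) = "" := by
            unfold bAns; rw [hsnoc, if_pos hB1le]
          rw [hansr, hsnoc, hM0, max_eq_left hB1le]

-- B's staged computation, reduced to bAns
theorem alt_eq (table : List String) (languages : List String) (preference : List Int)
    (hp : languages.length ≤ preference.length) :
    solution_alt table languages preference = bAns (scoreDictA languages preference) table := by
  unfold solution_alt
  dsimp only
  rw [← scoreDict_eq languages preference hp]
  rw [PySem.List.foldl_prod_mk
        (f := fun acc row => acc ++ [PySem.List.pyGetD (PySem.Str.split₀ row) 0 ""])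
        (g := fun acc row => acc ++ [rowTotalB (scoreDictA languages preference) (rowDict (PySem.Str.split₀ row))])]
  dsimp only
  rw [PySem.List.foldl_append_singleton_eq_map, PySem.List.foldl_append_singleton_eq_map]
  simp only [List.nil_append]
  have hmap : table.map (fun row => rowTotalB (scoreDictA languages preference) (rowDict (PySem.Str.split₀ row)))
      = table.map (ttF (scoreDictA languages preference)) :=
    List.map_congr_left (fun r _ =>
      (rowTotal_eq _ _ (nodup_keys_scoreDictA _ _) (nodup_keys_rowDict _)).symm)
  rw [hmap]
  have hbest : PySem.List.maxD (table.map (ttF (scoreDictA languages preference))) (fun x => x) 0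
      = bBest (scoreDictA languages preference) table := by
    cases table with
    | nil => rfl
    | cons r rs => simp [bBest, PySem.List.maxD, PySem.List.max?_id_cons]
  rw [hbest]
  by_cases hb : bBest (scoreDictA languages preference) table ≤ 0
  · rw [if_pos hb]; unfold bAns; rw [if_pos hb]
  · rw [if_neg hb]; unfold bAns; rw [if_neg hb]
    rw [List.zip_map', List.filter_map, List.map_map]
    have hmin : ∀ (xs : List String), (PySem.List.min? xs (fun x => x)).getD "" = minM xs := by
      intro xs
      cases xs with
      | nil => rfl
      | cons x tl => simp [PySem.List.min?_id_cons, minM]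
    rw [hmin]
    rfl

-- ===== VERDICT (by name: the statements are the Claim_ definitions above) =====
theorem solution_spec : Claim_equal_solution := by
  intro table languages preference _ hpre
  unfold Pre_solution at hpre
  unfold Spec_solution solution
  rw [loop_inv, alt_eq table languages preference hpre.1]
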